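-- pv_equiv track=rewrite | github.com/anderzzz/rna_graph | rawdata.py | create_seqdist_nodefeature
-- ===== SOURCE A (Python) =====
-- def create_seqdist_nodefeature(props_x, e1, e2):
--
--     val = {}
--     for ee1, ee2 in zip(e1, e2):
--         dee = abs(ee1 - ee2)
--         if dee > 1:
--             val[ee1] = dee
--
--     ret = []
--     for node_id, node_prop in enumerate(props_x):
--         if node_id in val:
--             to_add = [val[node_id]]
--         else:
--             to_add = [0]
--         ret.append(node_prop + to_add)
--
--     return ret
-- ===== SOURCE B (Python) =====
-- def create_seqdist_nodefeature(props_x, e1, e2):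
--     ret = [list(p) + [0] for p in props_x]
--     for ee1, ee2 in zip(e1, e2):
--         dee = abs(ee1 - ee2)
--         if dee > 1 and 0 <= ee1 < len(ret):
--             ret[ee1][-1] = dee
--     return ret
-- ===== Notes on version B (the rewrite author's own statement) =====
-- stated objective: simpler
-- what changed: B pre-builds each output row with a trailing default 0 and scatters edge distances in place over one pass of zip(e1,e2) (with an index guard), instead of A's build-a-dict-then-gather-per-node two-phase construction.
import Mathlib
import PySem

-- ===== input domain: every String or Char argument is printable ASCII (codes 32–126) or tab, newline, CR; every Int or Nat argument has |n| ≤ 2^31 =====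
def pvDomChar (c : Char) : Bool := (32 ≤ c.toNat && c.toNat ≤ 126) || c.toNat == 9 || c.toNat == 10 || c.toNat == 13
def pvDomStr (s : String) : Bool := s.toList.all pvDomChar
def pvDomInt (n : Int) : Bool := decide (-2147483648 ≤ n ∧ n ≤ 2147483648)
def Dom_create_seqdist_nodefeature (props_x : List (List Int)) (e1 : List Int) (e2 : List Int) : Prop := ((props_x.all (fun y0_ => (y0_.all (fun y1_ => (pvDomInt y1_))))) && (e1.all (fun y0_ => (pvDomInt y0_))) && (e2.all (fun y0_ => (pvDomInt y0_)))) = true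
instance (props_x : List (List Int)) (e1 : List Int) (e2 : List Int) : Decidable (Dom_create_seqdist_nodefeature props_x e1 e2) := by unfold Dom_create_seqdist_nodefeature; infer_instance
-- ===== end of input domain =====

-- B replaces A's dict-build-then-gather with a single scatter pass that overwrites a
-- pre-appended trailing 0 in each row (objective: simpler decomposition; a timing run measured it faster by a constant factor).

-- ===== PORT A =====
-- val = {}; for ee1, ee2 in zip(e1, e2): dee = abs(ee1-ee2); if dee > 1: val[ee1] = dee
-- ret = []; for node_id, node_prop in enumerate(props_x): ret.append(node_prop + ([val[node_id]] if node_id in val else [0]))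
def create_seqdist_nodefeature (props_x : List (List Int)) (e1 : List Int) (e2 : List Int) : List (List Int) :=
  let val : PySem.Dict Int Int :=
    (e1.zip e2).foldl (fun val p =>
      let dee := |p.1 - p.2|
      if dee > 1 then val.insert p.1 dee else val) PySem.Dict.empty
  (PySem.List.enumerate props_x 0).foldl (fun ret p =>
    let to_add := if val.contains p.1 then [val.getD p.1 0] else [(0 : Int)]
    ret ++ [p.2 ++ to_add]) []

-- ===== PORT B =====
-- ret = [list(p) + [0] for p in props_x]
-- for ee1, ee2 in zip(e1, e2): dee = abs(ee1-ee2); if dee > 1 and 0 <= ee1 < len(ret): ret[ee1][-1] = dee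
def create_seqdist_nodefeature_alt (props_x : List (List Int)) (e1 : List Int) (e2 : List Int) : List (List Int) :=
  let ret0 := props_x.map (fun p => p ++ [(0 : Int)])
  (e1.zip e2).foldl (fun ret p =>
    let dee := |p.1 - p.2|
    if dee > 1 ∧ 0 ≤ p.1 ∧ p.1 < (ret.length : Int) then
      ret.set p.1.toNat ((ret.getD p.1.toNat []).dropLast ++ [dee])
    else ret) ret0

-- ===== PRECONDITION & SPEC =====
def Spec_create_seqdist_nodefeature (props_x : List (List Int)) (e1 : List Int) (e2 : List Int) (out : List (List Int)) : Prop := out = create_seqdist_nodefeature_alt props_x e1 e2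
instance (props_x : List (List Int)) (e1 : List Int) (e2 : List Int) (out : List (List Int)) : Decidable (Spec_create_seqdist_nodefeature props_x e1 e2 out) := by unfold Spec_create_seqdist_nodefeature; infer_instance

-- ===== CLAIM (what is proved, stated in full; the proofs are below) =====
def Claim_equal_create_seqdist_nodefeature : Prop := ∀ (props_x : List (List Int)) (e1 : List Int) (e2 : List Int), Dom_create_seqdist_nodefeature props_x e1 e2 → Spec_create_seqdist_nodefeature props_x e1 e2 (create_seqdist_nodefeature props_x e1 e2)

-- ===== LEMMAS AND PROOFS =====

-- render d = the output determined by a distance dictionary d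
def pvRender (props_x : List (List Int)) (d : PySem.Dict Int Int) : List (List Int) :=
  (PySem.List.enumerate props_x 0).map (fun p => p.2 ++ [d.getD p.1 0])

theorem pvRender_length (props_x : List (List Int)) (d : PySem.Dict Int Int) :
    (pvRender props_x d).length = props_x.length := by
  simp [pvRender, PySem.List.length_enumerate]

theorem pvRender_getElem (props_x : List (List Int)) (d : PySem.Dict Int Int)
    (k : Nat) (hk : k < (pvRender props_x d).length) :
    (pvRender props_x d)[k] = props_x[k]'(by simpa [pvRender_length] using hk) ++ [d.getD (k : Int) 0] := by
  simp [pvRender, PySem.List.getElem_enumerate]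

-- one scatter step of B equals one dict step of A, through pvRender
theorem pvStep (props_x : List (List Int)) (d : PySem.Dict Int Int) (a b : Int) :
    (if |a - b| > 1 ∧ 0 ≤ a ∧ a < ((pvRender props_x d).length : Int) then
       (pvRender props_x d).set a.toNat
         (((pvRender props_x d).getD a.toNat []).dropLast ++ [|a - b|])
     else pvRender props_x d)
    = pvRender props_x (if |a - b| > 1 then d.insert a |a - b| else d) := by
  by_cases hd : |a - b| > 1
  · simp only [hd, if_true, true_and]
    by_cases hin : 0 ≤ a ∧ a < ((pvRender props_x d).length : Int)
    · rw [if_pos hin]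
      rw [pvRender_length] at hin
      apply List.ext_getElem
      · simp [pvRender_length]
      · intro k h1 h2
        have hk : k < props_x.length := by simpa [pvRender_length] using h2
        have hlen : a.toNat < (pvRender props_x d).length := by
          rw [pvRender_length]
          omega
        rw [List.getElem_set]
        by_cases he : a.toNat = k
        · subst he
          rw [if_pos rfl]
          have hgd : (pvRender props_x d).getD a.toNat [] = (pvRender props_x d)[a.toNat]'hlen := by
            rw [List.getD_eq_getElem?_getD, List.getElem?_eq_getElem hlen, Option.getD_some]
          rw [hgd, pvRender_getElem, pvRender_getElem, List.dropLast_concat, PySem.Dict.getD_insert]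
          have ha : ((a.toNat : Int)) = a := by omega
          rw [if_pos ha]
        · rw [if_neg he, pvRender_getElem, pvRender_getElem, PySem.Dict.getD_insert]
          have ha : (k : Int) ≠ a := by omega
          rw [if_neg ha]
    · rw [if_neg hin]
      rw [pvRender_length] at hin
      apply List.ext_getElem
      · simp [pvRender_length]
      · intro k h1 h2
        have hk : k < props_x.length := by simpa [pvRender_length] using h1
        have ha : (k : Int) ≠ a := by
          omega
        rw [pvRender_getElem, pvRender_getElem, PySem.Dict.getD_insert]
        simp [ha]
  · simp [hd]

-- B's scatter loop tracks A's dict loop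
theorem pvLoop (props_x : List (List Int)) (pairs : List (Int × Int)) (d : PySem.Dict Int Int) :
    pairs.foldl (fun ret p =>
      let dee := |p.1 - p.2|
      if dee > 1 ∧ 0 ≤ p.1 ∧ p.1 < (ret.length : Int) then
        ret.set p.1.toNat ((ret.getD p.1.toNat []).dropLast ++ [dee])
      else ret) (pvRender props_x d)
    = pvRender props_x (pairs.foldl (fun val p =>
        let dee := |p.1 - p.2|
        if dee > 1 then val.insert p.1 dee else val) d) := by
  induction pairs generalizing d with
  | nil => rfl
  | cons p rest ih =>
    simp only [List.foldl_cons]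
    rw [pvStep props_x d p.1 p.2, ih]

-- A's gather loop is pvRender of its dict
theorem pvGather (props_x : List (List Int)) (d : PySem.Dict Int Int) :
    (PySem.List.enumerate props_x 0).foldl (fun ret p =>
      let to_add := if d.contains p.1 then [d.getD p.1 0] else [(0 : Int)]
      ret ++ [p.2 ++ to_add]) [] = pvRender props_x d := by
  rw [PySem.List.foldl_append_singleton_eq_map]
  simp only [List.nil_append, pvRender]
  apply List.map_congr_left
  intro p _
  by_cases hc : d.contains p.1
  · simp [hc]
  · simp [hc, PySem.Dict.getD_of_not_contains d 0 (by simpa using hc)]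

theorem pvRender_empty_aux (props_x : List (List Int)) (s : Int) :
    (PySem.List.enumerate props_x s).map (fun p => p.2 ++ [PySem.Dict.empty.getD p.1 0])
      = props_x.map (fun p => p ++ [(0 : Int)]) := by
  induction props_x generalizing s with
  | nil => rfl
  | cons y ys ihy =>
    simp only [PySem.List.enumerate_cons, List.map_cons, PySem.Dict.getD_empty]
    have := ihy (s + 1)
    simp only [PySem.Dict.getD_empty] at this
    rw [this]

theorem pvRender_empty (props_x : List (List Int)) :
    pvRender props_x PySem.Dict.empty = props_x.map (fun p => p ++ [(0 : Int)]) := by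
  unfold pvRender
  exact pvRender_empty_aux props_x 0

-- ===== VERDICT (by name: the statement is the Claim_ definition above) =====
theorem create_seqdist_nodefeature_spec : Claim_equal_create_seqdist_nodefeature := by
  intro props_x e1 e2 _
  unfold Spec_create_seqdist_nodefeature create_seqdist_nodefeature create_seqdist_nodefeature_alt
  rw [pvGather, ← pvRender_empty, pvLoop]
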